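-- pv_equiv track=rewrite | github.com/pypi-data/pypi-mirror-21 | packages/smarttap/smarttap-1.0.0.tar.gz/smarttap-1.0.0/smarttap/Analysis_Module.py | journey_long
-- ===== SOURCE A (Python) =====
-- def journey_long(journey, jid):
--     """ Code for processing data for journeys with >2 trips
--     :param journey - List of trip data for journey
--     :param jid - Journey ID """
--     count = 0
--     for trip in journey:
--         if count == 0:
--             data = [trip[0], jid, trip[1], trip[2], trip[3], trip[4], 0,
--                     trip[4] - trip[4], trip[4] - trip[3]]
--         elif count > 0:
--             data[6] += 1
--             data[7] += trip[3] - data[5]  # Transit time (Jry BrdN - AliN-1)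
--             data[3] = trip[2]
--             data[5] = trip[4]
--             data[8] = data[5] - data[4]  # Total trip time
--         count += 1
--     return data
-- ===== SOURCE B (Python) =====
-- def journey_long(journey, jid):
--     """ Code for processing data for journeys with >2 trips
--     :param journey - List of trip data for journey
--     :param jid - Journey ID """
--     first = journey[0]
--     last = journey[-1]
--     transit = first[4] - first[4] + sum(b[3] - a[4] for a, b in zip(journey, journey[1:]))
--     return [first[0], jid, first[1], last[2], first[3], last[4],
--             len(journey) - 1, transit, last[4] - first[3]]
-- ===== Notes on version B (the rewrite author's own statement) =====
-- stated objective: simpler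
-- what changed: Replaces A's stateful count-flag fold that mutates a 9-slot record with a direct construction from journey[0], journey[-1], len(journey) and one sum over consecutive-pair gaps (zip). Pre_ excludes inputs where A raises: empty journeys (UnboundLocalError) and trips with fewer than 5 fields (IndexError).
import Mathlib
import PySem

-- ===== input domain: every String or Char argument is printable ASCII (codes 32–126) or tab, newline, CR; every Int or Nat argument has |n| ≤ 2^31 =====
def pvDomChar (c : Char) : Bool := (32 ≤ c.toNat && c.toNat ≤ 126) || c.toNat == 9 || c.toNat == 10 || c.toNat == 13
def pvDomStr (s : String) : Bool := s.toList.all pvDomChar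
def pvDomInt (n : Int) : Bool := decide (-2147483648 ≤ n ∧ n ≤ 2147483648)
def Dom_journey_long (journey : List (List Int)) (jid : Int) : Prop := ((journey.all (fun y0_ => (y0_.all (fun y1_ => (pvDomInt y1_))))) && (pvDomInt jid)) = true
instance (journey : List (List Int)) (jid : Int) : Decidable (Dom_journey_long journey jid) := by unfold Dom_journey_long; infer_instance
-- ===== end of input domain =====

-- B replaces A's stateful count-flag fold over a mutated 9-slot record by a direct construction
-- from the first trip, the last trip, the length, and one sum over consecutive-pair gaps (simpler).


-- ===== PORT A =====
def journey_long_step (jid : Int) (st : Int × List Int) (trip : List Int) : Int × List Int :=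
  let count := st.1
  let data := st.2
  if count == 0 then
    (count + 1,
      [PySem.List.pyGetD trip 0 0, jid, PySem.List.pyGetD trip 1 0, PySem.List.pyGetD trip 2 0,
       PySem.List.pyGetD trip 3 0, PySem.List.pyGetD trip 4 0, 0,
       PySem.List.pyGetD trip 4 0 - PySem.List.pyGetD trip 4 0,
       PySem.List.pyGetD trip 4 0 - PySem.List.pyGetD trip 3 0])
  else if count > 0 then
    let d1 := PySem.List.pySetD data 6 (PySem.List.pyGetD data 6 0 + 1)
    let d2 := PySem.List.pySetD d1 7 (PySem.List.pyGetD d1 7 0 + (PySem.List.pyGetD trip 3 0 - PySem.List.pyGetD d1 5 0))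
    let d3 := PySem.List.pySetD d2 3 (PySem.List.pyGetD trip 2 0)
    let d4 := PySem.List.pySetD d3 5 (PySem.List.pyGetD trip 4 0)
    let d5 := PySem.List.pySetD d4 8 (PySem.List.pyGetD d4 5 0 - PySem.List.pyGetD d4 4 0)
    (count + 1, d5)
  else (count + 1, data)

def journey_long (journey : List (List Int)) (jid : Int) : List Int :=
  (journey.foldl (journey_long_step jid) (0, ([] : List Int))).2

-- ===== PORT B =====
def journey_long_alt (journey : List (List Int)) (jid : Int) : List Int :=
  let first := PySem.List.pyGetD journey 0 []
  let last := PySem.List.pyGetD journey (-1) []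
  let transit := (PySem.List.pyGetD first 4 0 - PySem.List.pyGetD first 4 0) +
    ((journey.zip (PySem.List.slice journey (some 1) none)).foldl
      (fun acc p => acc + (PySem.List.pyGetD p.2 3 0 - PySem.List.pyGetD p.1 4 0)) 0)
  [PySem.List.pyGetD first 0 0, jid, PySem.List.pyGetD first 1 0,
   PySem.List.pyGetD last 2 0, PySem.List.pyGetD first 3 0, PySem.List.pyGetD last 4 0,
   PySem.List.len journey - 1, transit,
   PySem.List.pyGetD last 4 0 - PySem.List.pyGetD first 3 0]

-- ===== PRECONDITION & SPEC =====
-- Pre_ excludes exactly the inputs where A raises: empty journey (UnboundLocalError)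
-- and any trip with fewer than 5 fields (IndexError).
def Pre_journey_long (journey : List (List Int)) (jid : Int) : Prop :=
  journey ≠ [] ∧ ∀ t ∈ journey, 5 ≤ t.length
instance (journey : List (List Int)) (jid : Int) : Decidable (Pre_journey_long journey jid) := by
  unfold Pre_journey_long; infer_instance
def pvWitness_journey_long : List (List Int) × Int := ([[1, 2, 3, 4, 5], [6, 7, 8, 9, 10]], 42)
def Spec_journey_long (journey : List (List Int)) (jid : Int) (out : List Int) : Prop := out = journey_long_alt journey jid
instance (journey : List (List Int)) (jid : Int) (out : List Int) : Decidable (Spec_journey_long journey jid out) := by unfold Spec_journey_long; infer_instance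

-- ===== CLAIM (what is proved, stated in full; the proofs are below) =====
def Claim_equal_journey_long : Prop := ∀ (journey : List (List Int)) (jid : Int), Dom_journey_long journey jid → Pre_journey_long journey jid → Spec_journey_long journey jid (journey_long journey jid)

-- ===== LEMMAS AND PROOFS =====

-- sum of consecutive gaps t[3] - prev[4], seeded with the 4-field of the trip before the list
def pvGaps (p : Int) : List (List Int) → Int
  | [] => 0
  | t :: ts => (PySem.List.pyGetD t 3 0 - p) + pvGaps (PySem.List.pyGetD t 4 0) ts

-- last trip's field i, defaulting to d when the list is empty
def pvLastF (rest : List (List Int)) (i d : Int) : Int :=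
  match rest.getLast? with
  | none => d
  | some t => PySem.List.pyGetD t i 0

lemma pvLastF_cons (t : List Int) (ts : List (List Int)) (i d : Int) :
    pvLastF (t :: ts) i d = pvLastF ts i (PySem.List.pyGetD t i 0) := by
  cases ts with
  | nil => simp [pvLastF]
  | cons u us =>
    cases h : (u :: us).getLast? with
    | none => simp at h
    | some x => simp [pvLastF, List.getLast?_cons_cons, h]

lemma step_pos (jid c : Int) (hc : 1 ≤ c) (t : List Int) (d0 d1 d2 d3 d4 d5 d6 d7 d8 : Int) :
    journey_long_step jid (c, [d0, d1, d2, d3, d4, d5, d6, d7, d8]) t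
      = (c + 1, [d0, d1, d2, PySem.List.pyGetD t 2 0, d4, PySem.List.pyGetD t 4 0, d6 + 1,
                 d7 + (PySem.List.pyGetD t 3 0 - d5), PySem.List.pyGetD t 4 0 - d4]) := by
  have hc0 : (c == 0) = false := by simp; omega
  simp [journey_long_step, hc0, show c > 0 by omega, PySem.List.pySetD, PySem.List.pySet?,
    PySem.List.pyIdx?, PySem.List.pyGetD, PySem.List.pyGet?, List.set]

lemma foldA (rest : List (List Int)) :
    ∀ (c a0 a1 a2 a3 a4 a5 a6 a7 : Int), 1 ≤ c →
    (rest.foldl (journey_long_step a1) (c, [a0, a1, a2, a3, a4, a5, a6, a7, a5 - a4])).2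
      = [a0, a1, a2, pvLastF rest 2 a3, a4, pvLastF rest 4 a5,
         a6 + rest.length, a7 + pvGaps a5 rest, pvLastF rest 4 a5 - a4] := by
  induction rest with
  | nil => intro c a0 a1 a2 a3 a4 a5 a6 a7 hc; simp [pvLastF, pvGaps]
  | cons t ts ih =>
    intro c a0 a1 a2 a3 a4 a5 a6 a7 hc
    rw [List.foldl_cons, step_pos a1 c hc]
    rw [ih (c + 1) a0 a1 a2 (PySem.List.pyGetD t 2 0) a4 (PySem.List.pyGetD t 4 0)
      (a6 + 1) (a7 + (PySem.List.pyGetD t 3 0 - a5)) (by omega)]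
    rw [pvLastF_cons, pvLastF_cons]
    simp only [pvGaps, List.length_cons, List.cons.injEq]
    and_intros <;> first | trivial | (push_cast; ring)

lemma foldB (rest : List (List Int)) :
    ∀ (prev : List Int) (s : Int),
    ((prev :: rest).zip rest).foldl
      (fun acc p => acc + (PySem.List.pyGetD p.2 3 0 - PySem.List.pyGetD p.1 4 0)) s
      = s + pvGaps (PySem.List.pyGetD prev 4 0) rest := by
  induction rest with
  | nil => intro prev s; simp [pvGaps]
  | cons t ts ih =>
    intro prev s
    simp only [List.zip_cons_cons, List.foldl_cons, pvGaps]
    rw [ih t]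
    ring

lemma lastF_eq (f : List Int) (rest : List (List Int)) (i : Int) :
    pvLastF rest i (PySem.List.pyGetD f i 0)
      = PySem.List.pyGetD (PySem.List.pyGetD (f :: rest) (-1) []) i 0 := by
  induction rest generalizing f with
  | nil => simp [pvLastF, PySem.List.pyGetD_neg_one]
  | cons u us ih =>
    rw [pvLastF_cons, ih u]
    have h1 : PySem.List.pyGetD (f :: u :: us) (-1) ([] : List Int)
        = PySem.List.pyGetD (u :: us) (-1) ([] : List Int) := by
      simp [PySem.List.pyGetD, PySem.List.pyGet?_neg_one, List.getLast?_cons_cons]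
    rw [h1]

-- ===== VERDICT (by name: the statement is the Claim_ definition above) =====
theorem journey_long_spec : Claim_equal_journey_long := by
  intro journey jid _ hpre
  unfold Spec_journey_long
  obtain ⟨hne, _⟩ := hpre
  cases journey with
  | nil => exact absurd rfl hne
  | cons f rest =>
    unfold journey_long journey_long_alt
    simp only [List.foldl_cons]
    have hstep : journey_long_step jid (0, ([] : List Int)) f
        = (1, [PySem.List.pyGetD f 0 0, jid, PySem.List.pyGetD f 1 0, PySem.List.pyGetD f 2 0,
               PySem.List.pyGetD f 3 0, PySem.List.pyGetD f 4 0, 0,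
               PySem.List.pyGetD f 4 0 - PySem.List.pyGetD f 4 0,
               PySem.List.pyGetD f 4 0 - PySem.List.pyGetD f 3 0]) := by
      simp [journey_long_step]
    rw [hstep]
    have hA := foldA rest 1 (PySem.List.pyGetD f 0 0) jid (PySem.List.pyGetD f 1 0)
      (PySem.List.pyGetD f 2 0) (PySem.List.pyGetD f 3 0) (PySem.List.pyGetD f 4 0)
      0 (PySem.List.pyGetD f 4 0 - PySem.List.pyGetD f 4 0) le_rfl
    rw [hA]
    rw [PySem.List.slice_from_one]
    simp only [List.tail_cons, PySem.List.pyGetD_zero_cons, PySem.List.len_eq]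
    rw [foldB rest f 0]
    rw [lastF_eq f rest 2, lastF_eq f rest 4]
    simp only [List.cons.injEq]
    and_intros <;> first | trivial | (push_cast [List.length_cons]; ring)
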